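-- pv_equiv track=rewrite | github.com/myller-silva/final-compilers-project | src/parser.py | _organize_grammar
-- ===== SOURCE A (Python) =====
-- def _organize_grammar(
--     rules: list[tuple[str, list[str]]]
-- ) -> dict[str, list[list[str]]]:
--     """
--     Organiza a gramática em um formato mais acessível.
--
--     Args:
--         rules: Lista de regras da gramática.
--
--     Returns:
--         Um dicionário com as regras organizadas.
--     """
--     grammar = {}
--     for left, right in rules:
--         if left not in grammar:
--             grammar[left] = []
--         grammar[left].append(right)
--     return grammar
-- ===== SOURCE B (Python) =====
-- def _organize_grammar(
--     rules: list[tuple[str, list[str]]]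
-- ) -> dict[str, list[list[str]]]:
--     # Index-first strategy: collect the distinct left-hand sides in first-occurrence
--     # order, then build each group with one comprehension pass over the rules.
--     order = dict.fromkeys(left for left, _ in rules)
--     return {left: [right for l, right in rules if l == left] for left in order}
-- ===== Notes on version B (the rewrite author's own statement) =====
-- stated objective: alternative
-- what changed: Replaces the incremental dict construction (membership test + in-place append per rule) by an index-first strategy: dedup the left-hand sides once, then build each group with a filtering comprehension.
import Mathlib
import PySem

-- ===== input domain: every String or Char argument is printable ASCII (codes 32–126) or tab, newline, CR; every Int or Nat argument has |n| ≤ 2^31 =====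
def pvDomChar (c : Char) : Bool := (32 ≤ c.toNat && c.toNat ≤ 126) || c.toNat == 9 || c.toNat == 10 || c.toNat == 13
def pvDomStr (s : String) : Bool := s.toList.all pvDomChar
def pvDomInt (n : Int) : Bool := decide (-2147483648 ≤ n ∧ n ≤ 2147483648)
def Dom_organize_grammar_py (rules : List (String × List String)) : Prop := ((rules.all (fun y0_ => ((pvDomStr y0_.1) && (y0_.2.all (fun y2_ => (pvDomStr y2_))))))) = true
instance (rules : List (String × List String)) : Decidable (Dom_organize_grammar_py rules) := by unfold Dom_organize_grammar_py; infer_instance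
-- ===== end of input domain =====

-- B groups by an index-first strategy (dedup the left-hand sides, then one filtering pass per key)
-- instead of A's incremental dict construction; same return value, no speed claim.

-- ===== PORT A =====
def organize_grammar_py (rules : List (String × List String)) : List (String × List (List String)) :=
  (rules.foldl (fun g p =>
      let g1 := if g.contains p.1 then g else g.insert p.1 ([] : List (List String))
      g1.insert p.1 (g1.getD p.1 [] ++ [p.2]))
    (PySem.Dict.empty : PySem.Dict String (List (List String)))).items

-- ===== PORT B =====
def organize_grammar_py_alt (rules : List (String × List String)) : List (String × List (List String)) :=
  let order := PySem.List.dedup (rules.map (·.1))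
  (order.foldl (fun d k => d.insert k ((rules.filter (fun p => p.1 == k)).map (·.2)))
    (PySem.Dict.empty : PySem.Dict String (List (List String)))).items

-- ===== PRECONDITION & SPEC =====
def Spec_organize_grammar_py (rules : List (String × List String)) (out : List (String × List (List String))) : Prop := out = organize_grammar_py_alt rules
instance (rules : List (String × List String)) (out : List (String × List (List String))) : Decidable (Spec_organize_grammar_py rules out) := by unfold Spec_organize_grammar_py; infer_instance

-- ===== CLAIM (what is proved, stated in full; the proofs are below) =====
def Claim_equal_organize_grammar_py : Prop := ∀ (rules : List (String × List String)), Dom_organize_grammar_py rules → Spec_organize_grammar_py rules (organize_grammar_py rules)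

-- ===== LEMMAS AND PROOFS =====

-- A's loop body ("setdefault to []" then "append") is one Dict.modify step.
theorem stepA_eq_modify (g : PySem.Dict String (List (List String))) (p : String × List String) :
    (let g1 := if g.contains p.1 then g else g.insert p.1 ([] : List (List String))
     g1.insert p.1 (g1.getD p.1 [] ++ [p.2])) = g.modify p.1 [] (· ++ [p.2]) := by
  by_cases h : g.contains p.1 = true
  · simp only [h, if_true, PySem.Dict.modify]
  · have hc : g.contains p.1 = false := by simp [h]
    simp only [hc, Bool.false_eq_true, if_false, PySem.Dict.modify,
      PySem.Dict.getD_insert_self, PySem.Dict.insert_insert_self]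
    rw [PySem.Dict.getD_of_not_contains g ([] : List (List String)) hc]

theorem foldA_eq_modify (rules : List (String × List String)) :
    rules.foldl (fun g p =>
      let g1 := if g.contains p.1 then g else g.insert p.1 ([] : List (List String))
      g1.insert p.1 (g1.getD p.1 [] ++ [p.2]))
      (PySem.Dict.empty : PySem.Dict String (List (List String)))
    = rules.foldl (fun g p => g.modify p.1 [] (· ++ [p.2])) PySem.Dict.empty := by
  exact PySem.List.foldl_congr_mem _ _ _ _ (fun g p _ => stepA_eq_modify g p)

-- ===== VERDICT (by name: the statement is the Claim_ definition above) =====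
theorem organize_grammar_py_spec : Claim_equal_organize_grammar_py := by
  intro rules _
  show organize_grammar_py rules = organize_grammar_py_alt rules
  unfold organize_grammar_py organize_grammar_py_alt
  rw [foldA_eq_modify]
  set M := rules.foldl (fun g p => g.modify p.1 [] (· ++ [p.2]))
    (PySem.Dict.empty : PySem.Dict String (List (List String))) with hM
  have hkeys : M.keys = PySem.Set.ofList (rules.map (·.1)) := by
    rw [hM, PySem.Dict.keys_foldl_modify_key]
    simp [PySem.Dict.keys_empty, PySem.Set.update, PySem.Set.ofList_eq_foldl]
  have hnd : M.keys.Nodup := by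
    rw [hkeys]; exact PySem.Set.nodup_ofList _
  rw [PySem.Dict.items_eq_map_keys M hnd ([] : List (List String)), hkeys]
  rw [PySem.Dict.items_foldl_insert_fresh _ _ _ _
      (by intro a _; exact PySem.Dict.contains_empty a)
      (by simp [PySem.Set.nodup_ofList])]
  simp only [show (PySem.Dict.empty : PySem.Dict String (List (List String))).items = [] from rfl,
    List.nil_append, PySem.List.dedup_eq_ofList]
  apply List.map_congr_left
  intro k _
  rw [hM, PySem.Dict.getD_foldl_modify_append]
  simp [PySem.Dict.getD_empty]
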